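-- pv_equiv track=rewrite | github.com/wasd003/dwetl | util/MoveFile.py | retrieveProductId
-- ===== SOURCE A (Python) =====
-- def retrieveProductId(url):
--     if url is None:
--         return None
--     idx = url.find('/dp/')
--     if idx == -1:
--         return None
--     i = idx + 4
--     res = ''
--     while i < len(url) and url[i] != '/':
--         res += url[i]
--         i = i + 1
--     return res
-- ===== SOURCE B (Python) =====
-- def retrieveProductId(url):
--     if url is None or '/dp/' not in url:
--         return None
--     tail = url[url.find('/dp/') + 4:]
--     end = tail.find('/')
--     return tail if end == -1 else tail[:end]
-- ===== Notes on version B (the rewrite author's own statement) =====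
-- stated objective: idiomatic
-- what changed: Replaced the character-by-character accumulation while-loop with delimiter arithmetic: slice off everything after the first '/dp/' and cut at the next '/' found by str.find, with no loop at all.
import Mathlib
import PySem

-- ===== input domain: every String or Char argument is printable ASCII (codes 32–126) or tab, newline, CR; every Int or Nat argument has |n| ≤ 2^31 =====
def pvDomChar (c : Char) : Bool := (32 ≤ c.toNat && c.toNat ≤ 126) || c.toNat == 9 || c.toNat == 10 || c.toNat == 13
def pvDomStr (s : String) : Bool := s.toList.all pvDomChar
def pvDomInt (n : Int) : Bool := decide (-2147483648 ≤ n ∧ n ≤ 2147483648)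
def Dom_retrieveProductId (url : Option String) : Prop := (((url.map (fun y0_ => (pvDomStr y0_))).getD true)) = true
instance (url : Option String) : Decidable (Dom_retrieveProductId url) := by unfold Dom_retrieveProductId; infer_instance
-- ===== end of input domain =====

-- B replaces A's char-accumulation while-loop with find + slicing; equivalence of return values.

-- ===== PORT A =====
-- the while loop: accumulate url[i] into res while i < len(url) and url[i] != '/'
def pvALoop (cs : List Char) (i : Nat) (res : List Char) : List Char :=
  if h : i < cs.length then
    if cs[i] = '/' then res
    else pvALoop cs (i + 1) (res ++ [cs[i]])
  else res
termination_by cs.length - i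

def retrieveProductId (url : Option String) : Option String :=
  match url with
  | none => none
  | some s =>
    let idx := PySem.Str.find s "/dp/"
    if idx = -1 then none
    else some (String.ofList (pvALoop s.toList ((idx + 4)).toNat []))

-- ===== PORT B =====
def retrieveProductId_alt (url : Option String) : Option String :=
  match url with
  | none => none
  | some s =>
    if PySem.Str.isIn "/dp/" s then
      let tail := PySem.Str.slice s (some (PySem.Str.find s "/dp/" + 4)) none
      let e := PySem.Str.find tail "/"
      if e = -1 then some tail else some (PySem.Str.slice tail none (some e))
    else none

-- ===== PRECONDITION & SPEC =====
def Spec_retrieveProductId (url : Option String) (out : Option String) : Prop := out = retrieveProductId_alt url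
instance (url : Option String) (out : Option String) : Decidable (Spec_retrieveProductId url out) := by unfold Spec_retrieveProductId; infer_instance

-- ===== CLAIM (what is proved, stated in full; the proofs are below) =====
def Claim_equal_retrieveProductId : Prop := ∀ (url : Option String), Dom_retrieveProductId url → Spec_retrieveProductId url (retrieveProductId url)

-- ===== LEMMAS AND PROOFS =====

-- A's while-loop is takeWhile of the tail
theorem pvALoop_eq (cs : List Char) (i : Nat) (res : List Char) :
    pvALoop cs i res = res ++ (cs.drop i).takeWhile (fun c => !(c == '/')) := by
  fun_induction pvALoop cs i res with
  | case1 i res h hslash =>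
    rw [List.drop_eq_getElem_cons h]
    simp [hslash]
  | case2 i res h hslash ih =>
    rw [List.drop_eq_getElem_cons h, List.takeWhile_cons]
    simp [hslash, ih]
  | case3 i res h =>
    rw [List.drop_eq_nil_of_le (by omega)]
    simp

-- a singleton is a prefix iff it is the head
theorem singleton_prefix_iff_head? (a : Char) (l : List Char) : [a] <+: l ↔ l.head? = some a := by
  cases l with
  | nil => simp
  | cons b rest => simp [List.cons_prefix_cons, eq_comm]

-- takeWhile up to the first occurrence is take
theorem takeWhile_eq_take : ∀ (t : List Char) (k : Nat) (hk : k < t.length), t[k] = '/' →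
    (∀ i, (hik : i < k) → t[i]'(by omega) ≠ '/') →
    t.takeWhile (fun c => !(c == '/')) = t.take k := by
  intro t
  induction t with
  | nil => intro k hk; simp at hk
  | cons c rest ih =>
    intro k hk h1 h2
    cases k with
    | zero => simp_all
    | succ j =>
      have hc : c ≠ '/' := h2 0 (by omega)
      rw [List.take_succ_cons, List.takeWhile_cons]
      have : (!(c == '/')) = true := by simp [hc]
      rw [this, if_pos rfl]
      congr 1
      exact ih j (by simpa using hk) (by simpa using h1)
        (fun i hi => by simpa using h2 (i + 1) (by omega))

-- takeWhile up to the first '/' equals the find/take form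
theorem takeWhile_eq_find (t : List Char) :
    t.takeWhile (fun c => !(c == '/')) =
      (if PySem.Chars.find t ['/'] = -1 then t else t.take (PySem.Chars.find t ['/']).toNat) := by
  by_cases h : PySem.Chars.find t ['/'] = -1
  · rw [if_pos h]
    have hni : ¬ ['/'] <:+: t := (PySem.Chars.find_eq_neg_one_iff t ['/']).mp h
    refine List.takeWhile_eq_self_iff.mpr (fun a ha => ?_)
    simp only [Bool.not_eq_true', beq_eq_false_iff_ne, ne_eq]
    intro hae
    exact hni (hae ▸ (List.singleton_infix_iff a t).mpr ha)
  · rw [if_neg h]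
    have h0 : 0 ≤ PySem.Chars.find t ['/'] := by
      have := PySem.Chars.neg_one_le_find t ['/']
      omega
    obtain ⟨hpre, hfirst⟩ := PySem.Chars.find_spec (s := t) (sub := ['/']) h0
    set k := (PySem.Chars.find t ['/']).toNat with hkdef
    have hk : (t.drop k).head? = some '/' := (singleton_prefix_iff_head? _ _).mp hpre
    rw [List.head?_drop] at hk
    have hklt : k < t.length := by
      by_contra hge
      rw [List.getElem?_eq_none (by omega)] at hk
      simp at hk
    have hkv : t[k] = '/' := by
      rw [List.getElem?_eq_getElem hklt] at hk
      injection hk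
    refine takeWhile_eq_take t k hklt hkv (fun i hi => ?_)
    intro hiv
    refine hfirst i (by omega) ?_
    rw [singleton_prefix_iff_head?, List.head?_drop, List.getElem?_eq_getElem (by omega), hiv]

-- ===== VERDICT (by name: the statement is the Claim_ definition above) =====
theorem retrieveProductId_spec : Claim_equal_retrieveProductId := by
  intro url _
  unfold Spec_retrieveProductId
  cases url with
  | none => rfl
  | some s =>
    simp only [retrieveProductId, retrieveProductId_alt]
    by_cases h : PySem.Chars.find s.toList ['/', 'd', 'p', '/'] = -1
    · have hinf := (PySem.Chars.find_eq_neg_one_iff _ _).mp h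
      have hIn : PySem.Chars.isIn ['/', 'd', 'p', '/'] s.toList = false :=
        (PySem.Chars.isIn_eq_false_iff _ _).mpr hinf
      simp [h, hIn]
    · have h0 : 0 ≤ PySem.Chars.find s.toList ['/', 'd', 'p', '/'] := by
        have := PySem.Chars.neg_one_le_find s.toList ['/', 'd', 'p', '/']
        omega
      have hIn : PySem.Chars.isIn ['/', 'd', 'p', '/'] s.toList = true :=
        (PySem.Chars.isIn_iff_infix _ _).mpr ((PySem.Chars.find_ne_neg_one_iff _ _).mp h)
      set n := (PySem.Chars.find s.toList ['/', 'd', 'p', '/']).toNat with hn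
      have hcast : PySem.Chars.find s.toList ['/', 'd', 'p', '/'] + 4 = ((n + 4 : Nat) : Int) := by
        push_cast; omega
      have htoNat : (PySem.Chars.find s.toList ['/', 'd', 'p', '/'] + 4).toNat = n + 4 := by omega
      have htail : PySem.Chars.slice s.toList (some (PySem.Chars.find s.toList ['/', 'd', 'p', '/'] + 4))
          = s.toList.drop (n + 4) := by
        rw [hcast]
        exact PySem.List.slice_from_natCast s.toList (n + 4)
      have hdp : "/dp/".toList = ['/', 'd', 'p', '/'] := rfl
      have hsl : "/".toList = ['/'] := rfl
      simp only [PySem.Str.find_eq, PySem.Str.isIn_eq, PySem.Str.slice, String.toList_ofList,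
        hdp, hsl]
      rw [if_neg h, if_pos hIn]
      rw [htoNat, pvALoop_eq, List.nil_append, takeWhile_eq_find, htail]
      by_cases he : PySem.Chars.find (s.toList.drop (n + 4)) ['/'] = -1
      · rw [if_pos he, if_pos he]
      · rw [if_neg he, if_neg he]
        have hce : PySem.Chars.find (s.toList.drop (n + 4)) ['/']
            = ((PySem.Chars.find (s.toList.drop (n + 4)) ['/']).toNat : Int) := by
          have := PySem.Chars.neg_one_le_find (s.toList.drop (n + 4)) ['/']
          omega
        rw [hce]
        simp only [Int.toNat_natCast]
        exact congrArg (fun l => some (String.ofList l)) (PySem.List.slice_to_natCast _ _).symm
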